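-- pv_equiv track=rewrite | github.com/markosolopenko/python | сode_wars/practice/strings/adjacent_repeated_words.py | count_adjacent_pairs
-- ===== SOURCE A (Python) =====
-- def count_adjacent_pairs(st):
--     count = 0
--     check = []
--     if st:
--         st = st.lower().split()
--         for i in range(len(st)):
--             if st[i] not in check:
--                 check = []
--                 check.append(st[i])
--             elif st[i] in check and check.count(st[i]) < 2:
--                 count += 1
--                 check.append(st[i])
--         return count
--     return count
-- ===== SOURCE B (Python) =====
-- def count_adjacent_pairs(st):
--     if not st:
--         return 0
--     words = st.lower().split()
--     count = 0
--     i = 0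
--     n = len(words)
--     while i < n:
--         j = i + 1
--         while j < n and words[j] == words[i]:
--             j += 1
--         if j - i >= 2:
--             count += 1
--         i = j
--     return count
-- ===== Notes on version B (the rewrite author's own statement) =====
-- stated objective: simpler
-- what changed: Replaces A's stateful check-list-with-count-cap (membership tests, resets and a capped append) by a plain two-pointer scan that finds each maximal run of equal consecutive words and counts the runs of length >= 2.
import Mathlib
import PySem

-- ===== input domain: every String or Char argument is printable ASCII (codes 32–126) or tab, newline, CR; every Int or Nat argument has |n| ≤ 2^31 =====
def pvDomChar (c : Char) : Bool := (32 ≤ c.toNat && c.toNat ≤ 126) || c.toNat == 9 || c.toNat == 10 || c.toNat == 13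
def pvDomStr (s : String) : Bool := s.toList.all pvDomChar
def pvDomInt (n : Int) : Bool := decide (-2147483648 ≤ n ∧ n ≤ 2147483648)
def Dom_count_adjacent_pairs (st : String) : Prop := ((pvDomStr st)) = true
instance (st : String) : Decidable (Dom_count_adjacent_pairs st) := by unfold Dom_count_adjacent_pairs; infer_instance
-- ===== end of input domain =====

-- B replaces A's stateful check-list-with-count-cap by a two-pointer scan over maximal runs
-- of equal consecutive words, counting the runs of length ≥ 2 (objective: simpler).

-- ===== PORT A =====
-- one loop step of A: state = (count, check)
def pvStepA (s : Int × List String) (w : String) : Int × List String :=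
  if w ∉ s.2 then (s.1, [w])
  else if w ∈ s.2 ∧ PySem.List.count s.2 w < 2 then (s.1 + 1, s.2 ++ [w])
  else s

def count_adjacent_pairs (st : String) : Int :=
  if st ≠ "" then
    let ws := PySem.Str.split₀ (PySem.Str.lower st)
    ((PySem.List.pyRange 0 (ws.length : Int) 1).foldl
      (fun s i => pvStepA s (PySem.List.pyGetD ws i "")) (0, [])).1
  else 0

-- ===== PORT B =====
-- inner while: the run of words equal to w is the maximal equal prefix (takeWhile/dropWhile)
def pvRuns : List String → Int
  | [] => 0
  | w :: ws =>
    (if (ws.takeWhile (fun x => x == w)).length + 1 ≥ 2 then (1 : Int) else 0)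
      + pvRuns (ws.dropWhile (fun x => x == w))
termination_by l => l.length
decreasing_by
  simp only [List.length_cons]
  exact Nat.lt_succ_of_le (List.length_dropWhile_le _ _)

def count_adjacent_pairs_alt (st : String) : Int :=
  if st = "" then 0
  else pvRuns (PySem.Str.split₀ (PySem.Str.lower st))

-- ===== PRECONDITION & SPEC =====
def Spec_count_adjacent_pairs (st : String) (out : Int) : Prop := out = count_adjacent_pairs_alt st
instance (st : String) (out : Int) : Decidable (Spec_count_adjacent_pairs st out) := by unfold Spec_count_adjacent_pairs; infer_instance

-- ===== CLAIM (what is proved, stated in full; the proofs are below) =====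
def Claim_equal_count_adjacent_pairs : Prop := ∀ (st : String), Dom_count_adjacent_pairs st → Spec_count_adjacent_pairs st (count_adjacent_pairs st)

-- ===== LEMMAS AND PROOFS =====

-- joint invariant: from state (c,[w]) A's fold computes c + pvRuns (w :: ws)
-- (run not yet counted); from (c,[w,w]) it computes c + pvRuns of the rest after
-- skipping the leading w's (run already counted, further w's hit the count cap).
lemma pvFold_inv (ws : List String) :
    (∀ (c : Int) (w : String),
        (ws.foldl pvStepA (c, [w])).1 = c + pvRuns (w :: ws)) ∧
    (∀ (c : Int) (w : String),
        (ws.foldl pvStepA (c, [w, w])).1 = c + pvRuns (ws.dropWhile (fun x => x == w))) := by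
  induction ws with
  | nil =>
    constructor
    · intro c w
      simp [pvRuns, List.takeWhile, List.dropWhile]
    · intro c w
      simp [pvRuns]
  | cons x t ih =>
    obtain ⟨ih1, ih2⟩ := ih
    constructor
    · intro c w
      by_cases hxw : x = w
      · subst hxw
        have hstep : pvStepA (c, [x]) x = (c + 1, [x, x]) := by
          simp [pvStepA, PySem.List.count]
        simp only [List.foldl_cons, hstep, ih2]
        have : pvRuns (x :: x :: t) = 1 + pvRuns (t.dropWhile (fun y => y == x)) := by
          simp [pvRuns, List.takeWhile]
        rw [this]; ring
      · have hbeq : (x == w) = false := by simp [hxw]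
        have hstep : pvStepA (c, [w]) x = (c, [x]) := by
          simp [pvStepA, hxw]
        simp only [List.foldl_cons, hstep, ih1]
        have : pvRuns (w :: x :: t) = pvRuns (x :: t) := by
          conv_lhs => rw [pvRuns]
          simp [List.takeWhile, List.dropWhile, hbeq]
        rw [this]
    · intro c w
      by_cases hxw : x = w
      · subst hxw
        have hstep : pvStepA (c, [x, x]) x = (c, [x, x]) := by
          simp [pvStepA, PySem.List.count]
        simp only [List.foldl_cons, hstep, ih2]
        simp [List.dropWhile]
      · have hbeq : (x == w) = false := by simp [hxw]
        have hstep : pvStepA (c, [w, w]) x = (c, [x]) := by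
          simp [pvStepA, hxw]
        simp only [List.foldl_cons, hstep, ih1]
        simp [List.dropWhile, hbeq]

lemma pvFold_eq_pvRuns (ws : List String) :
    (ws.foldl pvStepA ((0 : Int), ([] : List String))).1 = pvRuns ws := by
  cases ws with
  | nil => simp [pvRuns]
  | cons x t =>
    have hstep : pvStepA (0, []) x = (0, [x]) := by simp [pvStepA]
    simp only [List.foldl_cons, hstep]
    have := (pvFold_inv t).1 0 x
    simpa using this

-- ===== VERDICT (by name: the statement is the Claim_ definition above) =====
theorem count_adjacent_pairs_spec : Claim_equal_count_adjacent_pairs := by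
  intro st _
  unfold Spec_count_adjacent_pairs count_adjacent_pairs count_adjacent_pairs_alt
  by_cases h : st = ""
  · simp [h]
  · simp only [h, if_neg, ne_eq, not_false_eq_true, if_true]
    rw [PySem.List.foldl_pyRange_zero_pyGetD' (PySem.Str.split₀ (PySem.Str.lower st)) "" pvStepA (0, [])]
    exact pvFold_eq_pvRuns _
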